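-- pv_equiv track=rewrite | github.com/MashaWaleed/BrightAnalyze | security_algorithm_analyzer.py | _custom_oem2
-- ===== SOURCE A (Python) =====
-- def _custom_oem2(seed):
--     """Custom OEM algorithm 2 (example)"""
--     # Another simulated algorithm
--     key = []
--     cumulative = 0
--     for i, byte in enumerate(seed):
--         cumulative = (cumulative + byte) & 0xFF
--         transformed = (byte ^ cumulative ^ (i * 17)) & 0xFF
--         key.append(transformed)
--     return key
-- ===== SOURCE B (Python) =====
-- def _custom_oem2(seed):
--     """Custom OEM algorithm 2 (example) — two-pass: full prefix sums first, then transform."""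
--     prefix = []
--     total = 0
--     for b in seed:
--         total += b
--         prefix.append(total)
--     return [(b ^ (c & 0xFF) ^ (i * 17)) & 0xFF
--             for i, (b, c) in enumerate(zip(seed, prefix))]
-- ===== Notes on version B (the rewrite author's own statement) =====
-- stated objective: alternative
-- what changed: B separates the computation into two passes: it first builds the unmasked running prefix sums, then maps a pure transformation over enumerate(zip(seed, prefix)), relying on the fact that masking the full prefix sum with 0xFF equals masking at every step; A interleaves accumulation, masking and transformation in one stateful loop.
import Mathlib
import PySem

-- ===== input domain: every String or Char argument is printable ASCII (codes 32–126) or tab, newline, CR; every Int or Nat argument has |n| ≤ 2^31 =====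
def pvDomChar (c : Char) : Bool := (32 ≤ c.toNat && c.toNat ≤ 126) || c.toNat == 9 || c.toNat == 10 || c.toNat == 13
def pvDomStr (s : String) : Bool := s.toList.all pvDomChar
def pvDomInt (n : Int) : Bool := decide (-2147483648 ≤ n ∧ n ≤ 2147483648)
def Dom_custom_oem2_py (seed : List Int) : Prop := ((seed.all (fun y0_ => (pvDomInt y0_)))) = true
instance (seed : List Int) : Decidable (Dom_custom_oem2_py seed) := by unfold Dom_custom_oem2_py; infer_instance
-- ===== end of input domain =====

-- B computes the full unmasked prefix sums in a first pass, then maps the byte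
-- transformation over enumerate(zip(seed, prefix)) in a second pass (alternative
-- decomposition of A's single stateful loop; same O(n) cost).


-- ===== PORT A =====
-- one loop: masked running sum 'cumulative' and output list, updated together
def oem2AStep (st : Int × List Int) (ib : Int × Int) : Int × List Int :=
  let cumulative := PySem.Int.band (st.1 + ib.2) 255
  (cumulative,
   st.2 ++ [PySem.Int.band (PySem.Int.bxor (PySem.Int.bxor ib.2 cumulative) (ib.1 * 17)) 255])

def custom_oem2_py (seed : List Int) : List Int :=
  ((PySem.List.enumerate seed).foldl oem2AStep (0, [])).2

-- ===== PORT B =====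
-- pass 1: unmasked prefix sums; pass 2: map the transformation
def oem2Prefix (st : Int × List Int) (b : Int) : Int × List Int :=
  (st.1 + b, st.2 ++ [st.1 + b])

def oem2BStep (p : Int × (Int × Int)) : Int :=
  PySem.Int.band (PySem.Int.bxor (PySem.Int.bxor p.2.1 (PySem.Int.band p.2.2 255)) (p.1 * 17)) 255

def custom_oem2_py_alt (seed : List Int) : List Int :=
  let pref := (seed.foldl oem2Prefix (0, [])).2
  (PySem.List.enumerate (seed.zip pref)).map oem2BStep

-- ===== PRECONDITION & SPEC =====
def Spec_custom_oem2_py (seed : List Int) (out : List Int) : Prop := out = custom_oem2_py_alt seed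
instance (seed : List Int) (out : List Int) : Decidable (Spec_custom_oem2_py seed out) := by unfold Spec_custom_oem2_py; infer_instance

-- ===== CLAIM (what is proved, stated in full; the proofs are below) =====
def Claim_equal_custom_oem2_py : Prop := ∀ (seed : List Int), Dom_custom_oem2_py seed → Spec_custom_oem2_py seed (custom_oem2_py seed)

-- ===== LEMMAS AND PROOFS =====
theorem nand255 (n : Nat) : n &&& 255 = n % 256 := by
  have := Nat.and_two_pow_sub_one_eq_mod n 8
  norm_num at this; exact this

theorem band255 (a : Int) : PySem.Int.band a 255 = a % 256 := by
  unfold PySem.Int.band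
  split_ifs with h h2
  · rw [show ((255:Int).toNat = 255) from rfl, nand255]
    omega
  · norm_num at h2
  · rw [show ((255:Int).toNat = 255) from rfl, Nat.and_comm, nand255]
    omega
  · norm_num at *

-- the prefix sums B's first pass produces, as a structural list
def oem2Prefixes (t : Int) : List Int → List Int
  | [] => []
  | b :: bs => (t + b) :: oem2Prefixes (t + b) bs

theorem oem2Prefix_fold (seed : List Int) : ∀ (t : Int) (acc : List Int),
    (seed.foldl oem2Prefix (t, acc)).2 = acc ++ oem2Prefixes t seed := by
  induction seed with
  | nil => intro t acc; simp [oem2Prefixes]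
  | cons b bs ih =>
      intro t acc
      simp only [List.foldl_cons, oem2Prefix, oem2Prefixes, ih]
      simp

theorem oem2_main (seed : List Int) : ∀ (s c t : Int) (acc : List Int), c = t % 256 →
    ((PySem.List.enumerate seed s).foldl oem2AStep (c, acc)).2
      = acc ++ (PySem.List.enumerate (seed.zip (oem2Prefixes t seed)) s).map oem2BStep := by
  induction seed with
  | nil => intro s c t acc h; simp [PySem.List.enumerate_nil, oem2Prefixes]
  | cons b bs ih =>
      intro s c t acc h
      have hcum : PySem.Int.band (c + b) 255 = PySem.Int.band (t + b) 255 := by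
        rw [band255, band255]; omega
      simp only [oem2Prefixes, List.zip_cons_cons, PySem.List.enumerate_cons,
        List.foldl_cons, List.map_cons, oem2AStep, oem2BStep, hcum]
      rw [ih (s + 1) (PySem.Int.band (t + b) 255) (t + b) _ (by rw [band255])]
      simp

theorem custom_oem2_py_eq (seed : List Int) : custom_oem2_py seed = custom_oem2_py_alt seed := by
  unfold custom_oem2_py custom_oem2_py_alt
  rw [oem2Prefix_fold seed 0 [], oem2_main seed 0 0 0 [] (by norm_num)]
  simp

-- ===== VERDICT (by name: the statement is the Claim_ definition above) =====
theorem custom_oem2_py_spec : Claim_equal_custom_oem2_py := by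
  intro seed _
  exact custom_oem2_py_eq seed
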